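-- pv_equiv track=rewrite | github.com/hassaan-ali/max_binary_gap | binarygap.py | calcGap
-- ===== SOURCE A (Python) =====
-- def calcGap(bin):
--     started = False
--     max_gap = 0
--     tmp_gap = 0
--
--     for c in bin:
--         if c == '1':
--             max_gap = max(max_gap, tmp_gap)
--             tmp_gap = 0
--         else:
--             tmp_gap += 1
--
--     return max_gap
-- ===== SOURCE B (Python) =====
-- def calcGap(bin):
--     parts = bin.split('1')
--     return max(map(len, parts[:-1]), default=0)
-- ===== Notes on version B (the rewrite author's own statement) =====
-- stated objective: simpler
-- what changed: Replaces the running-counter state machine with a split-on-'1' decomposition: the answer is the longest segment among all but the last piece of bin.split('1').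
import Mathlib
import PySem

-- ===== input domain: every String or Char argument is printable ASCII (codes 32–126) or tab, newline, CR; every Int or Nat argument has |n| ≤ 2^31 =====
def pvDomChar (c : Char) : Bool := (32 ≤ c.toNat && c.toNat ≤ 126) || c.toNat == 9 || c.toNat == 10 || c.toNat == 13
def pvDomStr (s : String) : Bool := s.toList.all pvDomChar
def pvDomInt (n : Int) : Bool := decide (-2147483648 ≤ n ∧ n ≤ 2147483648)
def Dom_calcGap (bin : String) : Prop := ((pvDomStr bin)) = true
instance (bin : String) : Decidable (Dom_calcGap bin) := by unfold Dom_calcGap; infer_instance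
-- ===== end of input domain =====

-- B replaces A's running-counter state machine by a split-on-'1' decomposition (objective: simpler).


-- ===== PORT A =====
-- A's `started` variable is assigned False and never read or updated; it is carried nowhere.
def calcGap (bin : String) : Int :=
  let st := bin.toList.foldl
    (fun (st : Int × Int) c =>
      if c = '1' then (max st.1 st.2, 0) else (st.1, st.2 + 1))
    (0, 0)
  st.1

-- ===== PORT B =====
-- parts = bin.split('1')  →  PySem.Chars.splitOn on the code points ('1' ≠ '' so split is total);
-- max(map(len, parts[:-1]), default=0)  →  foldl max 0 over the lengths (all lengths are ≥ 0).
def calcGap_alt (bin : String) : Int :=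
  let parts := PySem.Chars.splitOn bin.toList ['1']
  (parts.dropLast.map (fun p => (p.length : Int))).foldl max 0

-- ===== PRECONDITION & SPEC =====
def Spec_calcGap (bin : String) (out : Int) : Prop := out = calcGap_alt bin
instance (bin : String) (out : Int) : Decidable (Spec_calcGap bin out) := by unfold Spec_calcGap; infer_instance

-- ===== CLAIM (what is proved, stated in full; the proofs are below) =====
def Claim_equal_calcGap : Prop := ∀ (bin : String), Dom_calcGap bin → Spec_calcGap bin (calcGap bin)

-- ===== LEMMAS AND PROOFS =====

-- A simple structural splitter on '1', equal to PySem.Chars.splitOn · ['1'].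
def mySplit : List Char → List (List Char)
  | [] => [[]]
  | c :: r =>
    if c = '1' then [] :: mySplit r
    else
      match mySplit r with
      | [] => [[c]]
      | h :: t => (c :: h) :: t

theorem mySplit_ne_nil (l : List Char) : mySplit l ≠ [] := by
  cases l with
  | nil => simp [mySplit]
  | cons c r =>
    simp only [mySplit]
    split <;> [simp; split <;> simp]

def mergeHead (p : List Char) : List (List Char) → List (List Char)
  | [] => [p]
  | h :: t => (p ++ h) :: t

theorem go_eq (l : List Char) : ∀ (fuel : Nat) (cur : List Char) (acc : List (List Char)),
    l.length < fuel →
    PySem.Chars.splitOn.go ['1'] fuel l cur acc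
      = acc.reverse ++ mergeHead cur.reverse (mySplit l) := by
  induction l with
  | nil =>
    intro fuel cur acc h
    cases fuel with
    | zero => omega
    | succ m => simp [PySem.Chars.splitOn.go, mySplit, mergeHead]
  | cons c r ih =>
    intro fuel cur acc h
    cases fuel with
    | zero => simp at h
    | succ m =>
      by_cases hc : c = '1'
      · subst hc
        rw [show PySem.Chars.splitOn.go ['1'] (m+1) ('1' :: r) cur acc
              = PySem.Chars.splitOn.go ['1'] m r [] (cur.reverse :: acc) by
            simp [PySem.Chars.splitOn.go, List.isPrefixOf]]
        rw [ih m [] (cur.reverse :: acc) (by simpa using h)]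
        cases hs : mySplit r with
        | nil => exact absurd hs (mySplit_ne_nil r)
        | cons a b => simp [mySplit, hs, mergeHead]
      · rw [show PySem.Chars.splitOn.go ['1'] (m+1) (c :: r) cur acc
              = PySem.Chars.splitOn.go ['1'] m r (c :: cur) acc by
            simp [PySem.Chars.splitOn.go, List.isPrefixOf,
                  show ('1' == c) = false by simpa using fun h => hc h.symm]]
        rw [ih m (c :: cur) acc (by simpa using h)]
        cases hs : mySplit r with
        | nil => exact absurd hs (mySplit_ne_nil r)
        | cons a b =>
          simp [mySplit, hc, hs, mergeHead]

theorem splitOn_one (l : List Char) : PySem.Chars.splitOn l ['1'] = mySplit l := by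
  have := go_eq l (l.length + 1) [] [] (by omega)
  simp only [PySem.Chars.splitOn, this]
  cases hs : mySplit l with
  | nil => exact absurd hs (mySplit_ne_nil l)
  | cons a b => simp [mergeHead]

def gaps (l : List Char) : List Int := (mySplit l).dropLast.map (fun p => (p.length : Int))

def prependAdd (t : Int) : List Int → List Int
  | [] => []
  | g :: gs => (g + t) :: gs

theorem main_lemma (l : List Char) : ∀ (m t : Int),
    (l.foldl (fun (st : Int × Int) c =>
        if c = '1' then (max st.1 st.2, 0) else (st.1, st.2 + 1)) (m, t)).1
      = (prependAdd t (gaps l)).foldl max m := by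
  induction l with
  | nil => intro m t; simp [gaps, mySplit, prependAdd]
  | cons c r ih =>
    intro m t
    by_cases hc : c = '1'
    · subst hc
      simp only [List.foldl_cons, if_true]
      rw [ih (max m t) 0]
      have hg : gaps ('1' :: r) = 0 :: gaps r := by
        cases hs : mySplit r with
        | nil => exact absurd hs (mySplit_ne_nil r)
        | cons a b => simp [gaps, mySplit, hs]
      rw [hg]
      cases hgr : gaps r with
      | nil => simp [prependAdd]
      | cons g gs => simp [prependAdd]
    · simp only [List.foldl_cons, if_neg hc]
      rw [ih m (t + 1)]
      cases hs : mySplit r with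
      | nil => exact absurd hs (mySplit_ne_nil r)
      | cons h tl =>
        cases tl with
        | nil => simp [gaps, mySplit, hc, hs, prependAdd]
        | cons b tl' =>
          have h1 : gaps (c :: r) = ((c :: h).length : Int) :: (b :: tl').dropLast.map (fun p => (p.length : Int)) := by
            simp [gaps, mySplit, hc, hs]
          have h2 : gaps r = ((h).length : Int) :: (b :: tl').dropLast.map (fun p => (p.length : Int)) := by
            simp [gaps, hs]
          rw [h1, h2]
          simp only [prependAdd]
          have : (((c :: h).length : Int) + t) = ((h.length : Int) + (t + 1)) := by
            push_cast [List.length_cons]; ring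
          rw [this]

-- ===== VERDICT (by name: the statement is the Claim_ definition above) =====
theorem calcGap_spec : Claim_equal_calcGap := by
  intro bin _
  unfold Spec_calcGap calcGap calcGap_alt
  rw [splitOn_one]
  have := main_lemma bin.toList 0 0
  simp only [this]
  cases hg : gaps bin.toList with
  | nil => simp [gaps] at hg; simp [prependAdd, hg]
  | cons g gs =>
    simp only [prependAdd, add_zero]
    simp [gaps] at hg
    simp [hg]
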